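-- pv_equiv track=rewrite | github.com/teamcraft-bench/teamcraft | custom_task/helper.py | interleave_lists
-- ===== SOURCE A (Python) =====
-- def interleave_lists(lists):
--     """
--     Interleaves elements from a list of lists into a list of sublists, where each sublist contains
--     one element from each of the input lists, in order.
--
--     Parameters:
--         lists (list of lists): List containing several sublists from which elements are interleaved.
--
--     Returns:
--         list: A list of sublists, each containing one element from each input sublist.
--     """
--     # Ensure all lists are mutable (not necessary unless lists are tuples or other immutable types)
--     lists = [list(sublist) for sublist in lists]
--
--     combined = []
--     # Continue looping until all lists are exhausted
--     while any(lists):  # any() is true if at least one list still has items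
--         sublist = []
--         for sublist_index in range(len(lists)):
--             if lists[sublist_index]:  # Check if the current sublist has any items left
--                 sublist.append(lists[sublist_index].pop(0))  # Pop the first element if available
--         combined.append(sublist)
--     return combined
-- ===== SOURCE B (Python) =====
-- def interleave_lists(lists):
--     L = max((len(sub) for sub in lists), default=0)
--     result = [[] for _ in range(L)]
--     for sub in lists:
--         for j, x in enumerate(sub):
--             result[j].append(x)
--     return result
-- ===== Notes on version B (the rewrite author's own statement) =====
-- stated objective: faster
-- what changed: Replaces A's repeated round-by-round scan with pop(0) (quadratic shifting) by one row-major pass that scatters each element into pre-allocated position buckets.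
import Mathlib
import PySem

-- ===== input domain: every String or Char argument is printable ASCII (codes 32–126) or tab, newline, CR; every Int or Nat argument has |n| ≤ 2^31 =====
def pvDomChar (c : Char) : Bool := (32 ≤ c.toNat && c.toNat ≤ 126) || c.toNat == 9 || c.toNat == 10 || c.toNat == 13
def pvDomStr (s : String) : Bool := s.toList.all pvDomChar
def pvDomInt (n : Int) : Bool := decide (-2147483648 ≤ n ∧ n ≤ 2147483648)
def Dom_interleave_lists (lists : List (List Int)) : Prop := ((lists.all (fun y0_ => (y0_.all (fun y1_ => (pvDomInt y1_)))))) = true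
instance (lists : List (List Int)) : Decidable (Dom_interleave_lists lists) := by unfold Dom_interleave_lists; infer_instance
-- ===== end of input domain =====

-- B replaces A's round-by-round scan with repeated pop(0) by a single row-major pass
-- scattering each element into pre-allocated position buckets (objective: faster).

-- ===== PORT A =====
-- Termination measure for A's while-loop: total number of remaining elements.
def pvSumLen (ls : List (List Int)) : Nat := (ls.map List.length).sum

theorem pvSumLen_tail_le (ls : List (List Int)) :
    pvSumLen (ls.map List.tail) ≤ pvSumLen ls := by
  induction ls with
  | nil => simp [pvSumLen]
  | cons l ls ih =>
    have : (List.tail l).length ≤ l.length := by cases l <;> simp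
    simp only [pvSumLen, List.map_cons, List.sum_cons] at *
    omega

theorem pvSumLen_tail_lt (ls : List (List Int))
    (h : ls.any (fun l => !l.isEmpty) = true) :
    pvSumLen (ls.map List.tail) < pvSumLen ls := by
  induction ls with
  | nil => simp at h
  | cons l ls ih =>
    simp only [List.any_cons, Bool.or_eq_true] at h
    have hle : pvSumLen (ls.map List.tail) ≤ pvSumLen ls := pvSumLen_tail_le ls
    rcases h with h | h
    · have : (List.tail l).length < l.length := by
        cases l with
        | nil => simp at h
        | cons a as => simp
      simp only [pvSumLen, List.map_cons, List.sum_cons] at *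
      omega
    · have := ih h
      have : (List.tail l).length ≤ l.length := by cases l <;> simp
      simp only [pvSumLen, List.map_cons, List.sum_cons] at *
      omega

-- literal port of A's while-loop: while any(lists): collect first elements
-- of the nonempty sublists (in order), pop them, append the round to combined.
def pvLoopA (combined : List (List Int)) (ls : List (List Int)) : List (List Int) :=
  if h : ls.any (fun l => !l.isEmpty) = true then
    pvLoopA (combined ++ [ls.filterMap List.head?]) (ls.map List.tail)
  else combined
termination_by pvSumLen ls
decreasing_by simpa using pvSumLen_tail_lt ls h

def interleave_lists (lists : List (List Int)) : List (List Int) :=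
  pvLoopA [] lists

-- ===== PORT B =====
def interleave_lists_alt (lists : List (List Int)) : List (List Int) :=
  let L : Nat := (lists.map List.length).foldl Nat.max 0
  let result : List (List Int) := List.replicate L []
  lists.foldl
    (fun res sub =>
      (sub.zipIdx).foldl (fun r p => r.modify p.2 (fun a => a ++ [p.1])) res)
    result

-- ===== PRECONDITION & SPEC =====
def Spec_interleave_lists (lists : List (List Int)) (out : List (List Int)) : Prop := out = interleave_lists_alt lists
instance (lists : List (List Int)) (out : List (List Int)) : Decidable (Spec_interleave_lists lists out) := by unfold Spec_interleave_lists; infer_instance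

-- ===== CLAIM (what is proved, stated in full; the proofs are below) =====
def Claim_equal_interleave_lists : Prop := ∀ (lists : List (List Int)), Dom_interleave_lists lists → Spec_interleave_lists lists (interleave_lists lists)

-- ===== LEMMAS AND PROOFS =====

-- the k-th "column": the k-th element of each sublist that has one, in order
def pvCol (ls : List (List Int)) (k : Nat) : List Int := ls.filterMap (fun l => l[k]?)

-- the common value of both programs: columns 0 .. L-1
def pvIdeal (ls : List (List Int)) (L : Nat) : List (List Int) :=
  (List.range L).map (pvCol ls)

def pvMaxLen (ls : List (List Int)) : Nat := (ls.map List.length).foldl Nat.max 0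

theorem pvFoldlMax_init (ls : List (List Int)) : ∀ a : Nat,
    (ls.map List.length).foldl Nat.max a = Nat.max a (pvMaxLen ls) := by
  induction ls with
  | nil => intro a; simp [pvMaxLen]
  | cons l ls ih =>
    intro a
    have hcons : pvMaxLen (l :: ls) = Nat.max l.length (pvMaxLen ls) := by
      simp only [pvMaxLen, List.map_cons, List.foldl_cons]
      rw [ih]
      simp [pvMaxLen]
    rw [List.map_cons, List.foldl_cons, ih, hcons]
    exact Nat.max_assoc a l.length (pvMaxLen ls)

theorem pvMaxLen_cons (l : List Int) (ls : List (List Int)) :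
    pvMaxLen (l :: ls) = Nat.max l.length (pvMaxLen ls) := by
  simp only [pvMaxLen, List.map_cons, List.foldl_cons]
  rw [pvFoldlMax_init]
  simp [pvMaxLen]

theorem pvMaxLen_tail (ls : List (List Int)) :
    pvMaxLen (ls.map List.tail) = pvMaxLen ls - 1 := by
  induction ls with
  | nil => simp [pvMaxLen]
  | cons l ls ih =>
    rw [List.map_cons, pvMaxLen_cons, pvMaxLen_cons, ih, List.length_tail]
    simp only [Nat.max_def]
    split_ifs <;> omega

theorem pvAny_iff (ls : List (List Int)) :
    (ls.any (fun l => !l.isEmpty) = true) ↔ 0 < pvMaxLen ls := by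
  induction ls with
  | nil => simp [pvMaxLen]
  | cons l ls ih =>
    rw [pvMaxLen_cons]
    simp only [List.any_cons, Bool.or_eq_true, ih, lt_max_iff]
    cases l <;> simp

theorem pvCol_tail (ls : List (List Int)) (k : Nat) :
    pvCol (ls.map List.tail) k = pvCol ls (k + 1) := by
  simp [pvCol, List.filterMap_map, List.getElem?_tail]

theorem pvCol_zero (ls : List (List Int)) :
    pvCol ls 0 = ls.filterMap List.head? := by
  simp [pvCol, List.head?_eq_getElem?]

theorem pvLoopA_eq (n : Nat) : ∀ (ls : List (List Int)) (c : List (List Int)),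
    pvMaxLen ls = n → pvLoopA c ls = c ++ pvIdeal ls (pvMaxLen ls) := by
  induction n with
  | zero =>
    intro ls c h
    rw [pvLoopA.eq_def]
    have : ¬ (ls.any (fun l => !l.isEmpty) = true) := by
      rw [pvAny_iff]; omega
    rw [dif_neg this, h]
    simp [pvIdeal]
  | succ m ih =>
    intro ls c h
    rw [pvLoopA.eq_def]
    have hany : ls.any (fun l => !l.isEmpty) = true := by
      rw [pvAny_iff]; omega
    rw [dif_pos hany]
    rw [ih (ls.map List.tail) _ (by rw [pvMaxLen_tail]; omega)]
    rw [pvMaxLen_tail, h]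
    simp only [Nat.add_sub_cancel]
    rw [List.append_assoc]
    congr 1
    have : pvIdeal ls (m + 1)
        = pvCol ls 0 :: (List.range m).map (fun k => pvCol ls (k + 1)) := by
      simp [pvIdeal, List.range_succ_eq_map, List.map_map, Function.comp_def]
    rw [this, pvCol_zero]
    simp only [List.singleton_append, List.cons.injEq, true_and]
    simp [pvIdeal, pvCol_tail]

-- B's inner loop (scatter one sublist), characterised pointwise
theorem pvInner_getElem? (sub : List Int) : ∀ (n : Nat) (acc : List (List Int)) (k : Nat),
    ((sub.zipIdx n).foldl (fun r p => r.modify p.2 (fun a => a ++ [p.1])) acc)[k]? =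
      (fun a => a ++ (if n ≤ k then (sub[k - n]?).toList else [])) <$> acc[k]? := by
  induction sub with
  | nil =>
    intro n acc k
    simp only [List.zipIdx_nil, List.foldl_nil]
    cases acc[k]? <;> simp
  | cons x xs ih =>
    intro n acc k
    rw [List.zipIdx_cons, List.foldl_cons]
    rw [ih (n + 1) _ k]
    rw [List.getElem?_modify]
    cases hk : acc[k]? with
    | none => simp
    | some a =>
      simp only [Option.map_eq_map, Option.map_some]
      congr 1
      by_cases h1 : n = k
      · subst h1
        simp
      · by_cases h2 : n + 1 ≤ k
        · have hnk : n ≤ k := by omega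
          have hs : k - n = (k - (n + 1)) + 1 := by omega
          simp [h1, h2, hnk, hs]
        · have hnk : ¬ n ≤ k := by omega
          simp [h1, h2, hnk]

-- B's outer loop, characterised pointwise
theorem pvOuter_getElem? (ls : List (List Int)) : ∀ (acc : List (List Int)) (k : Nat),
    (ls.foldl
        (fun res sub =>
          (sub.zipIdx).foldl (fun r p => r.modify p.2 (fun a => a ++ [p.1])) res)
        acc)[k]? =
      (fun a => a ++ pvCol ls k) <$> acc[k]? := by
  induction ls with
  | nil =>
    intro acc k
    simp only [List.foldl_nil, pvCol, List.filterMap_nil]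
    cases acc[k]? <;> simp
  | cons l ls ih =>
    intro acc k
    rw [List.foldl_cons, ih, pvInner_getElem? l 0 acc k]
    have hcol : pvCol (l :: ls) k = (l[k]?).toList ++ pvCol ls k := by
      cases h : l[k]? <;> simp [pvCol, h]
    cases acc[k]? <;> simp [hcol]

theorem pvAlt_foldl (lists : List (List Int)) :
    interleave_lists_alt lists =
      lists.foldl
        (fun res sub =>
          (sub.zipIdx).foldl (fun r p => r.modify p.2 (fun a => a ++ [p.1])) res)
        (List.replicate (pvMaxLen lists) []) := rfl

theorem pvAlt_eq (lists : List (List Int)) :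
    interleave_lists_alt lists = pvIdeal lists (pvMaxLen lists) := by
  rw [pvAlt_foldl]
  apply List.ext_getElem?
  intro k
  rw [pvOuter_getElem?, List.getElem?_replicate]
  by_cases hk : k < pvMaxLen lists
  · rw [if_pos hk]
    simp [pvIdeal, hk]
  · rw [if_neg hk]
    symm
    rw [Option.map_eq_map, Option.map_none]
    rw [List.getElem?_eq_none_iff]
    simp only [pvIdeal, List.length_map, List.length_range]
    omega

-- ===== VERDICT (by name: the statement is the Claim_ definition above) =====
theorem interleave_lists_spec : Claim_equal_interleave_lists := by
  intro lists _
  unfold Spec_interleave_lists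
  rw [pvAlt_eq]
  show pvLoopA [] lists = _
  rw [pvLoopA_eq (pvMaxLen lists) lists [] rfl]
  simp
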